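-- pv_equiv track=rewrite | github.com/saadm28/ap-roadmap-automation | extractor.py | _find_year_header_row
-- ===== SOURCE A (Python) =====
-- from typing import Optional, Any
--
-- def _cell_looks_like_year(cell: str) -> bool:
--     """True if cell is a 4-digit year (e.g. 2025, 2038)."""
--     s = (cell or "").strip().replace(",", "")
--     return bool(s and len(s) == 4 and s.isdigit() and s.startswith("20"))
--
-- def _find_year_header_row(
--     rows: list[tuple[float, list[str]]], retirement_year: int
-- ) -> tuple[Optional[int], Optional[int]]:
--     """
--     Find the year header row that contains the retirement year (exact string match in a cell).
--     Column index is determined by: for idx, cell in enumerate(header_row): if cell.strip() == str(retirement_year): column = idx.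
--     Do not assume consistent column index across PDFs. Returns (header_row_index, retirement_col_index) or (None, None).
--     """
--     year_str = str(retirement_year)
--     candidates = []  # (row_index, col_index, year_like_cell_count)
--     for ri, (_, cells) in enumerate(rows):
--         col_index = None
--         for idx, cell in enumerate(cells):
--             if (cell or "").strip() == year_str:
--                 col_index = idx
--                 break
--         if col_index is None:
--             continue
--         year_like_count = sum(1 for c in cells if _cell_looks_like_year(c))
--         candidates.append((ri, col_index, year_like_count))
--     if not candidates:
--         return None, None
--     candidates.sort(key=lambda x: (-x[2], x[0]))
--     return candidates[0][0], candidates[0][1]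
-- ===== SOURCE B (Python) =====
-- from typing import Optional
--
-- def _cell_looks_like_year(cell: str) -> bool:
--     """True if cell is a 4-digit year (e.g. 2025, 2038)."""
--     s = (cell or "").strip().replace(",", "")
--     return bool(s and len(s) == 4 and s.isdigit() and s.startswith("20"))
--
-- def _find_year_header_row(
--     rows: list[tuple[float, list[str]]], retirement_year: int
-- ) -> tuple[Optional[int], Optional[int]]:
--     """Back-to-front scan keeping the best suffix candidate; '>=' lets an
--     earlier row overtake ties, so the earliest row with the maximal
--     year-like-cell count wins, with no candidate list and no sort."""
--     year_str = str(retirement_year)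
--     best = None  # (row_index, col_index, year_like_count)
--     for ri in range(len(rows) - 1, -1, -1):
--         cells = rows[ri][1]
--         stripped = [(c or "").strip() for c in cells]
--         if year_str not in stripped:
--             continue
--         count = len([c for c in cells if _cell_looks_like_year(c)])
--         if best is None or count >= best[2]:
--             best = (ri, stripped.index(year_str), count)
--     return (best[0], best[1]) if best is not None else (None, None)
-- ===== Notes on version B (the rewrite author's own statement) =====
-- stated objective: simpler
-- what changed: Replaces the candidates list plus sort by (-count, row) with a single back-to-front scan keeping one running best candidate, where '>=' lets an earlier row overtake equal counts so ties resolve to the smallest row index.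
import Mathlib
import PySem

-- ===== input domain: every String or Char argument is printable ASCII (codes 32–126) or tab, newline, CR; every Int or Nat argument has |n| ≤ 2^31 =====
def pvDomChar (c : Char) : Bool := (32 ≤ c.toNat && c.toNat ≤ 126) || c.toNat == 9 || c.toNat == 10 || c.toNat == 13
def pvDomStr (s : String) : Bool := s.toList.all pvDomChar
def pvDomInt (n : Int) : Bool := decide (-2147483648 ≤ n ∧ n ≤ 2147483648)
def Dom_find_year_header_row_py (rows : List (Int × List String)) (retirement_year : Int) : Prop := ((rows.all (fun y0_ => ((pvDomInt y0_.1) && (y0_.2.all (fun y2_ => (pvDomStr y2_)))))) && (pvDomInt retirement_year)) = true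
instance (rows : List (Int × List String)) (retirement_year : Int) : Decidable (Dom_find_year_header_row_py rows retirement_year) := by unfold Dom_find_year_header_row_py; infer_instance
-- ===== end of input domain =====

-- B replaces A's candidates list + sort by (-count, row) with a back-to-front scan keeping one
-- running best, where '>=' lets an earlier row overtake equal counts: simpler, no list, no sort.

-- ===== PORT A =====

-- _cell_looks_like_year (helper of Source A)
def cellLooksLikeYearA (cell : String) : Bool :=
  let s := PySem.Str.replace (PySem.Str.strip cell) "," ""
  decide (s ≠ "") && decide (PySem.Str.len s = 4) && PySem.Str.strIsdigit s && PySem.Str.startswith s "20"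

-- the inner `for idx, cell in enumerate(cells): … break` loop of A
def findColA (yearStr : String) : List (Int × String) → Option Int
  | [] => none
  | (idx, cell) :: rest =>
    if PySem.Str.strip cell = yearStr then some idx else findColA yearStr rest

def find_year_header_row_py (rows : List (Int × List String)) (retirement_year : Int) : Option Int × Option Int :=
  let yearStr := PySem.Int.toStr retirement_year
  let candidates : List (Int × Int × Int) :=
    (PySem.List.enumerate rows).foldl (fun acc p =>
      match findColA yearStr (PySem.List.enumerate p.2.2) with
      | none => acc
      | some col =>
        acc ++ [(p.1, col, p.2.2.foldl (fun n c => if cellLooksLikeYearA c then n + 1 else n) (0 : Int))]) []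
  match PySem.List.sorted2 candidates (fun x => -x.2.2) (fun x => x.1) with
  | [] => (none, none)
  | c :: _ => (some c.1, some c.2.1)

-- ===== PORT B =====

-- _cell_looks_like_year (helper of Source B, same code)
def cellLooksLikeYearB (cell : String) : Bool :=
  let s := PySem.Str.replace (PySem.Str.strip cell) "," ""
  decide (s ≠ "") && decide (PySem.Str.len s = 4) && PySem.Str.strIsdigit s && PySem.Str.startswith s "20"

-- Source B's `for ri in range(len(rows)-1, -1, -1)` loop: recurse to get the best of the LATER rows
-- first (`tail`), then let row i overtake it when `count >= tail's count`; `.index` is guarded by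
-- `in`, so the `.getD 0` default is never used (totality guard only).
def bestFromB (yearStr : String) : List (Int × List String) → Int → Option (Int × Int × Int)
  | [], _ => none
  | r :: rest, i =>
    let tail := bestFromB yearStr rest (i + 1)
    let stripped := r.2.map PySem.Str.strip
    if stripped.contains yearStr then
      let count : Int := ((r.2.filter cellLooksLikeYearB).length : Int)
      match tail with
      | none => some (i, (((PySem.List.index? stripped yearStr).getD 0 : Nat) : Int), count)
      | some b =>
        if count ≥ b.2.2 then some (i, (((PySem.List.index? stripped yearStr).getD 0 : Nat) : Int), count)
        else some b
    else tail

def find_year_header_row_py_alt (rows : List (Int × List String)) (retirement_year : Int) : Option Int × Option Int :=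
  match bestFromB (PySem.Int.toStr retirement_year) rows 0 with
  | none => (none, none)
  | some b => (some b.1, some b.2.1)

-- ===== PRECONDITION & SPEC =====
def Spec_find_year_header_row_py (rows : List (Int × List String)) (retirement_year : Int) (out : Option Int × Option Int) : Prop := out = find_year_header_row_py_alt rows retirement_year
instance (rows : List (Int × List String)) (retirement_year : Int) (out : Option Int × Option Int) : Decidable (Spec_find_year_header_row_py rows retirement_year out) := by unfold Spec_find_year_header_row_py; infer_instance

-- ===== CLAIM (what is proved, stated in full; the proofs are below) =====
def Claim_equal_find_year_header_row_py : Prop := ∀ (rows : List (Int × List String)) (retirement_year : Int), Dom_find_year_header_row_py rows retirement_year → Spec_find_year_header_row_py rows retirement_year (find_year_header_row_py rows retirement_year)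

-- ===== LEMMAS AND PROOFS =====

-- the candidate list A conceptually traverses: (row_index, col_index, count)
def candsOf (yearStr : String) : List (Int × List String) → Int → List (Int × Int × Int)
  | [], _ => []
  | r :: rest, i =>
    match findColA yearStr (PySem.List.enumerate r.2) with
    | none => candsOf yearStr rest (i + 1)
    | some col =>
      (i, col, r.2.foldl (fun n c => if cellLooksLikeYearA c then n + 1 else n) (0 : Int))
        :: candsOf yearStr rest (i + 1)

-- first maximum by count from the left, ties to the earlier element
def fmStep (b : Option (Int × Int × Int)) (c : Int × Int × Int) : Option (Int × Int × Int) :=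
  match b with
  | none => some c
  | some b => if c.2.2 > b.2.2 then some c else some b

-- best-of-suffix from the right, ties to the earlier (head) element
def bestR : List (Int × Int × Int) → Option (Int × Int × Int)
  | [] => none
  | c :: t =>
    match bestR t with
    | none => some c
    | some b => if c.2.2 ≥ b.2.2 then some c else some b

theorem countA_eq_filter (cells : List String) : ∀ n0 : Int,
    cells.foldl (fun n c => if cellLooksLikeYearA c then n + 1 else n) n0
      = n0 + ((cells.filter cellLooksLikeYearB).length : Int) := by
  have hAB : cellLooksLikeYearB = cellLooksLikeYearA := rfl
  rw [hAB]
  induction cells with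
  | nil => intro n0; simp
  | cons c rest ih =>
    intro n0
    rw [List.foldl_cons, List.filter_cons]
    by_cases hc : cellLooksLikeYearA c
    · rw [if_pos hc, if_pos hc, ih (n0 + 1)]
      simp only [List.length_cons]; push_cast; omega
    · rw [if_neg hc, if_neg (by simp [hc]), ih n0]

theorem findColA_eq_index? (yearStr : String) (cells : List String) : ∀ i : Int,
    findColA yearStr (PySem.List.enumerate cells i)
      = (PySem.List.index? (cells.map PySem.Str.strip) yearStr).map (fun k => i + (k : Int)) := by
  induction cells with
  | nil => intro i; simp [PySem.List.enumerate_nil, findColA, PySem.List.index?_eq_idxOf?]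
  | cons c rest ih =>
    intro i
    rw [PySem.List.enumerate_cons]
    simp only [findColA, List.map_cons]
    by_cases hc : PySem.Str.strip c = yearStr
    · subst hc
      rw [PySem.List.index?_cons_self]
      simp
    · rw [if_neg hc, PySem.List.index?_cons_of_ne _ hc, ih (i + 1)]
      cases PySem.List.index? (rest.map PySem.Str.strip) yearStr with
      | none => rfl
      | some k => simp; omega

-- B's suffix recursion computes the right-fold best of A's candidate list
theorem bestFromB_eq (yearStr : String) (rows : List (Int × List String)) :
    ∀ i : Int, bestFromB yearStr rows i = bestR (candsOf yearStr rows i) := by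
  induction rows with
  | nil => intro i; rfl
  | cons r rest ih =>
    intro i
    simp only [bestFromB, candsOf, ih (i + 1)]
    rw [findColA_eq_index? yearStr r.2 0]
    cases hidx : PySem.List.index? (r.2.map PySem.Str.strip) yearStr with
    | none =>
      have hmem : yearStr ∉ r.2.map PySem.Str.strip :=
        (PySem.List.index?_eq_none_iff _ _).1 hidx
      have hcont : (r.2.map PySem.Str.strip).contains yearStr = false := by
        rw [Bool.eq_false_iff]
        intro h
        exact hmem (List.contains_iff_mem.1 h)
      rw [hcont]
      simp
    | some k =>
      have hsome : (PySem.List.index? (r.2.map PySem.Str.strip) yearStr).isSome = true := by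
        rw [hidx]; rfl
      have hmem : yearStr ∈ r.2.map PySem.Str.strip :=
        (PySem.List.index?_isSome_iff (r.2.map PySem.Str.strip) yearStr).1 hsome
      have hcont : (r.2.map PySem.Str.strip).contains yearStr = true :=
        List.contains_iff_mem.2 hmem
      rw [hcont, countA_eq_filter r.2 0]
      simp only [if_pos, Option.getD_some, zero_add]
      cases candsOf yearStr rest (i + 1) with
      | nil => simp [bestR]
      | cons c t => simp [bestR]

-- left running first-max over a list, started from some b
theorem foldl_fmStep_some (l : List (Int × Int × Int)) :
    ∀ b : Int × Int × Int,
    l.foldl fmStep (some b)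
      = (match bestR l with
         | none => some b
         | some c => if c.2.2 > b.2.2 then some c else some b) := by
  induction l with
  | nil => intro b; rfl
  | cons x t ih =>
    intro b
    rw [List.foldl_cons]
    by_cases hx : x.2.2 > b.2.2
    · rw [show fmStep (some b) x = some x by simp [fmStep, hx], ih x]
      simp only [bestR]
      cases hbt : bestR t with
      | none => simp [hx]
      | some c =>
        by_cases hxc : x.2.2 ≥ c.2.2
        · simp [hxc, show ¬ c.2.2 > x.2.2 by omega, hx]
        · simp [hxc, show c.2.2 > x.2.2 by omega, show c.2.2 > b.2.2 by omega]
    · rw [show fmStep (some b) x = some b by simp [fmStep, hx], ih b]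
      simp only [bestR]
      cases hbt : bestR t with
      | none => simp [hx]
      | some c =>
        by_cases hxc : x.2.2 ≥ c.2.2
        · simp [hxc, show ¬ c.2.2 > b.2.2 by omega, hx]
        · simp [hxc]

theorem foldl_fmStep_none (l : List (Int × Int × Int)) :
    l.foldl fmStep none = bestR l := by
  cases l with
  | nil => rfl
  | cons x t =>
    rw [List.foldl_cons, show fmStep none x = some x from rfl, foldl_fmStep_some t x]
    simp only [bestR]
    cases hbt : bestR t with
    | none => rfl
    | some c =>
      by_cases h : c.2.2 > x.2.2
      · simp [h, show ¬ x.2.2 ≥ c.2.2 by omega]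
      · simp [h, show x.2.2 ≥ c.2.2 by omega]

-- A's candidates fold builds candsOf
theorem candsA_eq (yearStr : String) (rows : List (Int × List String)) :
    ∀ (i : Int) (acc : List (Int × Int × Int)),
    (PySem.List.enumerate rows i).foldl (fun acc p =>
      match findColA yearStr (PySem.List.enumerate p.2.2) with
      | none => acc
      | some col =>
        acc ++ [(p.1, col, p.2.2.foldl (fun n c => if cellLooksLikeYearA c then n + 1 else n) (0 : Int))]) acc
      = acc ++ candsOf yearStr rows i := by
  induction rows with
  | nil => intro i acc; simp [PySem.List.enumerate_nil, candsOf]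
  | cons r rest ih =>
    intro i acc
    rw [PySem.List.enumerate_cons]
    simp only [List.foldl_cons, candsOf]
    cases h : findColA yearStr (PySem.List.enumerate r.2) with
    | none => simp [ih]
    | some col => simp [ih]

theorem candsOf_mem_ge (yearStr : String) (rows : List (Int × List String)) :
    ∀ (i : Int) (c : Int × Int × Int), c ∈ candsOf yearStr rows i → i ≤ c.1 := by
  induction rows with
  | nil => intro i c h; simp [candsOf] at h
  | cons r rest ih =>
    intro i c h
    simp only [candsOf] at h
    cases hf : findColA yearStr (PySem.List.enumerate r.2) with
    | none =>
      rw [hf] at h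
      have := ih (i + 1) c h; omega
    | some col =>
      rw [hf] at h
      rcases List.mem_cons.1 h with h | h
      · subst h; omega
      · have := ih (i + 1) c h; omega

theorem candsOf_pairwise (yearStr : String) (rows : List (Int × List String)) :
    ∀ (i : Int), (candsOf yearStr rows i).Pairwise (fun a b => a.1 < b.1) := by
  induction rows with
  | nil => intro i; simp [candsOf]
  | cons r rest ih =>
    intro i
    simp only [candsOf]
    cases hf : findColA yearStr (PySem.List.enumerate r.2) with
    | none => exact ih (i + 1)
    | some col =>
      refine List.pairwise_cons.2 ⟨?_, ih (i + 1)⟩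
      intro c hc
      have := candsOf_mem_ge yearStr rest (i + 1) c hc
      simpa using by omega

-- head of insertBy
theorem head?_insertBy {α : Type} (before : α → α → Bool) (x : α) (l : List α) :
    (PySem.List.insertBy before x l).head? =
      some (match l.head? with
            | none => x
            | some h => if before x h then x else h) := by
  cases l with
  | nil => rfl
  | cons h t =>
    simp only [PySem.List.insertBy]
    by_cases hb : before x h = true <;> simp [hb]

-- members of insertBy
theorem mem_insertBy' {α : Type} (before : α → α → Bool) (x y : α) (l : List α) :
    y ∈ PySem.List.insertBy before x l → y = x ∨ y ∈ l := by
  intro h; exact (PySem.List.mem_insertBy before x y l).1 h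

-- head of the insertion-sort fold = running first-max by count,
-- provided the row indices strictly increase along the list
theorem head_sortfold (before : (Int × Int × Int) → (Int × Int × Int) → Bool)
    (hb : ∀ a b : Int × Int × Int, b.1 < a.1 →
      (before a b = true ↔ b.2.2 < a.2.2))
    (l : List (Int × Int × Int)) :
    ∀ (acc : List (Int × Int × Int)),
    (∀ a ∈ acc, ∀ c ∈ l, a.1 < c.1) → l.Pairwise (fun a b => a.1 < b.1) →
    (l.foldl (fun acc x => PySem.List.insertBy before x acc) acc).head? =
      l.foldl fmStep acc.head? := by
  induction l with
  | nil => intro acc _ _; rfl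
  | cons x rest ih =>
    intro acc hlt hpw
    simp only [List.foldl_cons]
    have hpw' := (List.pairwise_cons.1 hpw).2
    have hxrest := (List.pairwise_cons.1 hpw).1
    rw [ih (PySem.List.insertBy before x acc) ?_ hpw']
    · congr 1
      rw [head?_insertBy]
      cases hh : acc.head? with
      | none => rfl
      | some h =>
        have hmem : h ∈ acc := List.mem_of_head? hh
        have hh1 : h.1 < x.1 := hlt h hmem x (by simp)
        simp only [fmStep]
        rw [show before x h = decide (h.2.2 < x.2.2) by
          by_cases hc : h.2.2 < x.2.2
          · simp [hc, (hb x h hh1).2 hc]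
          · have hfalse : before x h = false := by
              cases hcase : before x h
              · rfl
              · exact absurd ((hb x h hh1).1 hcase) hc
            simp [hc, hfalse]]
        by_cases hc : h.2.2 < x.2.2 <;> simp [hc]
    · intro a ha c hc
      rcases mem_insertBy' before x a acc ha with rfl | ha'
      · exact hxrest c hc
      · exact hlt a ha' c (by simp [hc])

-- the sorted2 `before` relation of port A satisfies hb
theorem before_spec (a b : Int × Int × Int) (h : b.1 < a.1) :
    ((decide ((fun x : Int × Int × Int => -x.2.2) a < (fun x : Int × Int × Int => -x.2.2) b) ||
      (!decide ((fun x : Int × Int × Int => -x.2.2) b < (fun x : Int × Int × Int => -x.2.2) a) &&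
        decide ((fun x : Int × Int × Int => x.1) a < (fun x : Int × Int × Int => x.1) b))) = true)
      ↔ b.2.2 < a.2.2 := by
  simp only [Bool.or_eq_true, Bool.and_eq_true, Bool.not_eq_true', decide_eq_true_eq,
    decide_eq_false_iff_not]
  omega

-- ===== VERDICT (by name: the statement is the Claim_ definition above) =====
theorem find_year_header_row_py_spec : Claim_equal_find_year_header_row_py := by
  intro rows retirement_year _
  unfold Spec_find_year_header_row_py
  simp only [find_year_header_row_py, find_year_header_row_py_alt]
  rw [candsA_eq, bestFromB_eq]
  simp only [List.nil_append]
  set yearStr := PySem.Int.toStr retirement_year with hys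
  set l := candsOf yearStr rows 0 with hl
  have hsort : PySem.List.sorted2 l (fun x => -x.2.2) (fun x => x.1) =
      l.foldl (fun acc x => PySem.List.insertBy
        (fun a b => decide ((fun x : Int × Int × Int => -x.2.2) a < (fun x : Int × Int × Int => -x.2.2) b) ||
          (!decide ((fun x : Int × Int × Int => -x.2.2) b < (fun x : Int × Int × Int => -x.2.2) a) &&
            decide ((fun x : Int × Int × Int => x.1) a < (fun x : Int × Int × Int => x.1) b))) x acc) [] := rfl
  have hhead := head_sortfold _ before_spec l []
    (by intro a ha; simp at ha) (candsOf_pairwise yearStr rows 0)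
  simp only [List.head?_nil] at hhead
  rw [← hsort, foldl_fmStep_none] at hhead
  cases hs : PySem.List.sorted2 l (fun x => -x.2.2) (fun x => x.1) with
  | nil =>
    rw [hs] at hhead
    simp only [List.head?_nil] at hhead
    cases hfm : bestR l with
    | none => simp
    | some c => rw [hfm] at hhead; simp at hhead
  | cons c t =>
    rw [hs] at hhead
    simp only [List.head?_cons] at hhead
    cases hfm : bestR l with
    | none => rw [hfm] at hhead; simp at hhead
    | some c' =>
      rw [hfm] at hhead
      simp only [Option.some.injEq] at hhead
      subst hhead
      simp
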